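-- pv_equiv track=rewrite | github.com/bartosz121/advent-of-code-2020 | python/day6/p.py | day6
-- ===== SOURCE A (Python) =====
-- def day6(list_):
--     part1 = 0
--     part2 = 0
--     start_group = 0
--     for group in list_:
--         answers = group.split("\n")
--
--         # part 1
--         part1 += len(set("".join(answers)))
--
--         # part 2
--         ans_sets = [set(ans) for ans in answers]
--         # *ans_sets = unpacking
--         part2 += len(ans_sets[0].intersection(*ans_sets))
--
--     return part1, part2
-- ===== SOURCE B (Python) =====
-- def day6(list_):
--     # Vote-count table per group instead of set union / unpacked intersection:
--     # count, for each distinct character, how many people answered it; the union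
--     # size is the table size, the intersection size is the number of characters
--     # whose count equals the number of people.
--     part1 = 0
--     part2 = 0
--     for group in list_:
--         answers = group.split("\n")
--         votes = {}
--         for ans in answers:
--             for c in set(ans):
--                 votes[c] = votes.get(c, 0) + 1
--         part1 += len(votes)
--         n = len(answers)
--         part2 += len([v for v in votes.values() if v == n])
--     return part1, part2
-- ===== Notes on version B (the rewrite author's own statement) =====
-- stated objective: idiomatic
-- what changed: Replaces per-group set union (len(set(join))) and unpacked set intersection with a single character vote-count table: part1 is the table size and part2 counts characters voted by all members.
import Mathlib
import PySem

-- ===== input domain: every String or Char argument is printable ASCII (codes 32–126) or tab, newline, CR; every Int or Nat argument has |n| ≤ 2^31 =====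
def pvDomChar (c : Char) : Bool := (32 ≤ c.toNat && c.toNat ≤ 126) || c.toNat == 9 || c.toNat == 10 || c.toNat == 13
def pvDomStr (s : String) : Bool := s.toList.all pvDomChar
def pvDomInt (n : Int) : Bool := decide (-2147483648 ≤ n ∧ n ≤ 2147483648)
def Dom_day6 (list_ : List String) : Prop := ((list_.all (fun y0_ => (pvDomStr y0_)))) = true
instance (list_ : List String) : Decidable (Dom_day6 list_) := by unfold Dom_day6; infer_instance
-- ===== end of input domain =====

-- B replaces A's per-group set union / unpacked set intersection with a character
-- vote-count table (objective: idiomatic; same cost, different data structure).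

-- ===== PORT A =====
-- A's 'start_group = 0' is dead state (never read or updated) and is omitted.
def day6 (list_ : List String) : Int × Int :=
  list_.foldl
    (fun st group =>
      let answers : List (List Char) := PySem.Chars.splitOn group.toList ['\n']
      -- part 1
      let part1 : Int := st.1 + ((PySem.Set.ofList (PySem.Chars.join [] answers)).length : Int)
      -- part 2
      let ansSets : List (PySem.Set Char) := answers.map (fun ans => PySem.Set.ofList ans)
      let part2 : Int := st.2 +
        (match ansSets with
         | [] => 0  -- unreachable: str.split always returns at least one piece
         | s0 :: _ => ((ansSets.foldl PySem.Set.inter s0).length : Int))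
      (part1, part2))
    ((0 : Int), (0 : Int))

-- ===== PORT B =====
def day6_alt (list_ : List String) : Int × Int :=
  list_.foldl
    (fun st group =>
      let answers : List (List Char) := PySem.Chars.splitOn group.toList ['\n']
      let votes : PySem.Dict Char Int :=
        answers.foldl
          (fun d ans => (PySem.Set.ofList ans).foldl (fun d c => d.modify c 0 (· + 1)) d)
          PySem.Dict.empty
      let n : Int := answers.length
      (st.1 + (votes.size : Int),
       st.2 + ((votes.values.filter (fun v => v == n)).length : Int)))
    ((0 : Int), (0 : Int))

-- ===== PRECONDITION & SPEC =====
def Spec_day6 (list_ : List String) (out : Int × Int) : Prop := out = day6_alt list_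
instance (list_ : List String) (out : Int × Int) : Decidable (Spec_day6 list_ out) := by unfold Spec_day6; infer_instance

-- ===== CLAIM (what is proved, stated in full; the proofs are below) =====
def Claim_equal_day6 : Prop := ∀ (list_ : List String), Dom_day6 list_ → Spec_day6 list_ (day6 list_)

-- ===== LEMMAS AND PROOFS =====

-- str.split(sep) always returns at least one piece
theorem splitOn_go_ne_nil (sep : List Char) :
    ∀ (fuel : Nat) (l cur : List Char) (acc : List (List Char)),
      PySem.Chars.splitOn.go sep fuel l cur acc ≠ [] := by
  intro fuel
  induction fuel with
  | zero => intro l cur acc; simp [PySem.Chars.splitOn.go]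
  | succ m ih =>
      intro l cur acc
      cases l with
      | nil => simp [PySem.Chars.splitOn.go]
      | cons c rest =>
          simp only [PySem.Chars.splitOn.go]
          split_ifs with h
          · exact ih _ _ _
          · exact ih _ _ _

theorem splitOn_ne_nil (s sep : List Char) : PySem.Chars.splitOn s sep ≠ [] := by
  unfold PySem.Chars.splitOn; exact splitOn_go_ne_nil _ _ _ _ _

-- "".join(parts) is the concatenation of the parts
theorem join_nil_left (parts : List (List Char)) :
    PySem.Chars.join [] parts = parts.flatten := by
  induction parts with
  | nil => simp [PySem.Chars.join_nil]
  | cons p rest ih =>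
      cases rest with
      | nil => simp [PySem.Chars.join_singleton]
      | cons q rest' =>
          rw [PySem.Chars.join_cons_cons]
          simp [ih]

theorem mem_foldl_inter (sets : List (PySem.Set Char)) :
    ∀ (s : PySem.Set Char) (c : Char),
      c ∈ sets.foldl PySem.Set.inter s ↔ c ∈ s ∧ ∀ t ∈ sets, c ∈ t := by
  induction sets with
  | nil => simp
  | cons t rest ih =>
      intro s c
      simp only [List.foldl_cons, ih, PySem.Set.mem_inter, List.mem_cons]
      constructor
      · rintro ⟨⟨hs, ht⟩, hall⟩
        exact ⟨hs, fun u hu => hu.elim (fun h => h ▸ ht) (hall u)⟩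
      · rintro ⟨hs, hall⟩
        exact ⟨⟨hs, hall t (Or.inl rfl)⟩, fun u hu => hall u (Or.inr hu)⟩

theorem nodup_foldl_inter (sets : List (PySem.Set Char)) :
    ∀ (s : PySem.Set Char), s.Nodup → (sets.foldl PySem.Set.inter s).Nodup := by
  induction sets with
  | nil => intro s h; exact h
  | cons t rest ih => intro s h; exact ih _ (PySem.Set.nodup_inter _ _ h)

-- the vote table is Counter(flatMap of the per-answer character sets)
theorem votes_eq_counter (answers : List (List Char)) :
    answers.foldl
        (fun d ans => (PySem.Set.ofList ans).foldl (fun d c => d.modify c 0 (· + 1)) d)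
        PySem.Dict.empty
      = PySem.Dict.counter (answers.flatMap (fun a => PySem.Set.ofList a)) := by
  rw [PySem.Dict.counter_eq_foldl, List.foldl_flatMap]

-- each character's vote count = number of answers containing it
theorem count_flatMap_sets (answers : List (List Char)) (c : Char) :
    (answers.flatMap (fun a => PySem.Set.ofList a)).count c
      = answers.countP (fun a => decide (c ∈ a)) := by
  rw [List.count_flatMap]
  induction answers with
  | nil => simp
  | cons a rest ih =>
      simp only [List.map_cons, List.sum_cons, List.countP_cons, Function.comp, ih]
      have hnd := PySem.Set.nodup_ofList (α := Char) a
      have hle := List.nodup_iff_count_le_one.mp hnd c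
      by_cases hc : c ∈ a
      · have : 0 < (PySem.Set.ofList a).count c :=
          List.count_pos_iff.mpr ((PySem.Set.mem_ofList a c).mpr hc)
        simp [hc]
        omega
      · have : (PySem.Set.ofList a).count c = 0 :=
          List.count_eq_zero.mpr (fun h => hc ((PySem.Set.mem_ofList a c).mp h))
        simp [hc, this]

-- two nodup lists with the same members have the same length
theorem length_eq_of_nodup_of_mem_iff {l m : List Char} (h1 : l.Nodup) (h2 : m.Nodup)
    (h : ∀ x, x ∈ l ↔ x ∈ m) : l.length = m.length :=
  ((List.perm_ext_iff_of_nodup h1 h2).mpr h).length_eq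

-- per-group part-1 agreement
theorem part1_group (answers : List (List Char)) :
    ((PySem.Set.ofList (PySem.Chars.join [] answers)).length : Int)
      = ((PySem.Dict.counter (answers.flatMap (fun a => PySem.Set.ofList a))).size : Int) := by
  have hsize : (PySem.Dict.counter (answers.flatMap (fun a => PySem.Set.ofList a))).size
      = (PySem.Set.ofList (answers.flatMap (fun a => PySem.Set.ofList a))).length := by
    simp [PySem.Dict.size, PySem.Dict.items_counter]
  rw [join_nil_left, hsize]
  norm_cast
  apply length_eq_of_nodup_of_mem_iff (PySem.Set.nodup_ofList _) (PySem.Set.nodup_ofList _)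
  intro x
  simp [PySem.Set.mem_ofList, List.mem_flatten, List.mem_flatMap]

-- per-group part-2 agreement
theorem part2_group (a0 : List Char) (rest : List (List Char)) :
    (((PySem.Set.ofList a0 :: rest.map (fun ans => PySem.Set.ofList ans)).foldl PySem.Set.inter
        (PySem.Set.ofList a0)).length : Int)
      = (((PySem.Dict.counter ((a0 :: rest).flatMap (fun a => PySem.Set.ofList a))).values.filter
          (fun v => v == ((a0 :: rest).length : Int))).length : Int) := by
  have hvals : (PySem.Dict.counter ((a0 :: rest).flatMap (fun a => PySem.Set.ofList a))).values
      = (PySem.Set.ofList ((a0 :: rest).flatMap (fun a => PySem.Set.ofList a))).map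
          (fun k => ((((a0 :: rest).flatMap (fun a => PySem.Set.ofList a)).count k : Nat) : Int)) := by
    simp [PySem.Dict.values, PySem.Dict.items_counter, List.map_map, Function.comp]
  rw [hvals, List.filter_map, List.length_map]
  have hcongr : ((PySem.Set.ofList ((a0 :: rest).flatMap (fun a => PySem.Set.ofList a))).filter
        ((fun v => v == ((a0 :: rest).length : Int)) ∘
          fun k => ((((a0 :: rest).flatMap (fun a => PySem.Set.ofList a)).count k : Nat) : Int)))
      = ((PySem.Set.ofList ((a0 :: rest).flatMap (fun a => PySem.Set.ofList a))).filter
          (fun k => decide (∀ a ∈ (a0 :: rest), k ∈ a))) := by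
    apply List.filter_congr
    intro k _
    simp only [Function.comp, count_flatMap_sets]
    refine Bool.eq_iff_iff.mpr ?_
    simp only [beq_iff_eq, decide_eq_true_eq]
    rw [Nat.cast_inj, List.countP_eq_length]
    simp
  rw [hcongr]
  norm_cast
  apply length_eq_of_nodup_of_mem_iff
  · exact nodup_foldl_inter _ _ (PySem.Set.nodup_ofList a0)
  · exact (PySem.Set.nodup_ofList _).filter _
  · intro k
    rw [mem_foldl_inter]
    simp only [List.mem_filter, List.mem_cons, List.mem_map, PySem.Set.mem_ofList,
      List.mem_flatMap, decide_eq_true_eq]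
    constructor
    · rintro ⟨h0, hall⟩
      refine ⟨⟨a0, Or.inl rfl, h0⟩, ?_⟩
      rintro a (rfl | ha)
      · exact h0
      · exact (PySem.Set.mem_ofList a k).mp (hall _ (Or.inr ⟨a, ha, rfl⟩))
    · rintro ⟨-, hall⟩
      refine ⟨hall a0 (Or.inl rfl), ?_⟩
      rintro t (rfl | ⟨a, ha, rfl⟩)
      · exact (PySem.Set.mem_ofList a0 k).mpr (hall a0 (Or.inl rfl))
      · exact (PySem.Set.mem_ofList a k).mpr (hall a (Or.inr ha))

-- ===== VERDICT (by name: the statement is the Claim_ definition above) =====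
theorem day6_spec : Claim_equal_day6 := by
  intro list_ _
  unfold Spec_day6 day6 day6_alt
  congr 1
  funext st group
  simp only
  rw [votes_eq_counter]
  obtain ⟨a0, rest, h⟩ : ∃ a0 rest, PySem.Chars.splitOn group.toList ['\n'] = a0 :: rest := by
    cases hh : PySem.Chars.splitOn group.toList ['\n'] with
    | nil => exact absurd hh (splitOn_ne_nil _ _)
    | cons a0 rest => exact ⟨a0, rest, rfl⟩
  rw [h]
  simp only [List.map_cons]
  rw [part1_group, part2_group]
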